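-- pv_equiv track=rewrite | github.com/pmelet/tcnlu | tcnlu/main.py | number_as_string_grouped
-- ===== SOURCE A (Python) =====
-- UNITS = [
--     "one",
--     "two",
--     "three",
--     "four",
--     "five",
--     "six",
--     "seven",
--     "eight",
--     "nine",
--     "ten",
--     "eleven",
--     "twelve",
--     "thirteen",
--     "fourteen",
--     "fifteen",
--     "sixteen",
--     "seventeen",
--     "eighteen",
--     "nineteen",
-- ]
--
-- TENS = [
--     "ten",
--     "twenty",
--     "thirty",
--     "fourty",
--     "fifty",
--     "sixty",
--     "seventy",
--     "eighty",
--     "ninety",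
-- ]
--
-- def number_as_string_grouped(number):
--     stack = []
--     if number % 100 >= 20:
--         stack.insert(0, TENS[((number % 100) // 10)-1] + " " + number_as_string_grouped(number%10))
--     else:
--         stack.insert(0, UNITS[number%100-1])
--     if number >= 100:
--         stack.insert(0, number_as_string_grouped(number//100) + " hundred")
--     return (" ".join(stack))
-- ===== SOURCE B (Python) =====
-- UNITS = [
--     "one", "two", "three", "four", "five", "six", "seven", "eight", "nine",
--     "ten", "eleven", "twelve", "thirteen", "fourteen", "fifteen", "sixteen",
--     "seventeen", "eighteen", "nineteen",
-- ]
--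
-- TENS = [
--     "ten", "twenty", "thirty", "fourty", "fifty", "sixty", "seventy",
--     "eighty", "ninety",
-- ]
--
-- def number_as_string_grouped(number):
--     groups = []
--     n = number
--     while True:
--         m = n % 100
--         if m >= 20:
--             groups.append(TENS[m // 10 - 1] + " " + UNITS[(n % 10) - 1])
--         else:
--             groups.append(UNITS[m - 1])
--         if n < 100:
--             break
--         n //= 100
--     return " hundred ".join(reversed(groups))
-- ===== Notes on version B (the rewrite author's own statement) =====
-- stated objective: simpler
-- what changed: Replaces A's recursion (a recursive call per hundred-group plus an inner recursive call for the ones digit, joining two-element stacks at every level) with a single iterative loop that collects each base-100 group's two-digit tail inline and does one ' hundred '-join of the reversed group list.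
import Mathlib
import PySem

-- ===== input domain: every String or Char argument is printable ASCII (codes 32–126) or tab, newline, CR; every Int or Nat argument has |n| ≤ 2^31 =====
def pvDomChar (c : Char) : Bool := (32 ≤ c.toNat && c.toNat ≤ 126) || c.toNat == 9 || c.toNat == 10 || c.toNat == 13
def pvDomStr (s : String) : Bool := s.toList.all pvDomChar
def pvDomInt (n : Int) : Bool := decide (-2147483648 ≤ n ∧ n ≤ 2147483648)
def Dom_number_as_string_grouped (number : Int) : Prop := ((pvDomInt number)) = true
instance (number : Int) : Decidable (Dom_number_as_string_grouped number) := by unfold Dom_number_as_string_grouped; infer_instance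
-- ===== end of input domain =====

-- B replaces A's double recursion (and per-level two-element join) by a single iterative loop
-- collecting each base-100 group's two-digit tail, then one " hundred "-join of the reversed
-- groups; same return value everywhere (objective: simpler decomposition, not speed).

-- ===== PORT A =====
def pvUNITS : List String :=
  ["one", "two", "three", "four", "five", "six", "seven", "eight", "nine",
   "ten", "eleven", "twelve", "thirteen", "fourteen", "fifteen", "sixteen",
   "seventeen", "eighteen", "nineteen"]

def pvTENS : List String :=
  ["ten", "twenty", "thirty", "fourty", "fifty", "sixty", "seventy", "eighty", "ninety"]

-- Python UNITS[i]/TENS[i] is PySem.List.pyGet? (negative index reads from the end, as Python);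
-- the indices that occur are always in range, so the `.getD ""` default never fires.
def number_as_string_grouped (number : Int) : String :=
  let stack : List String :=
    if PySem.Int.mod number 100 ≥ 20 then
      [(PySem.List.pyGet? pvTENS (PySem.Int.floordiv (PySem.Int.mod number 100) 10 - 1)).getD ""
        ++ " " ++ number_as_string_grouped (PySem.Int.mod number 10)]
    else
      [(PySem.List.pyGet? pvUNITS (PySem.Int.mod number 100 - 1)).getD ""]
  let stack2 : List String :=
    if number ≥ 100 then
      (number_as_string_grouped (PySem.Int.floordiv number 100) ++ " hundred") :: stack
    else stack
  PySem.Str.join " " stack2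
termination_by 2 * number.toNat + (if 20 ≤ PySem.Int.mod number 100 then 20 else 0)
decreasing_by
  · rename_i h
    have h0 : (0:Int) ≤ PySem.Int.mod number 10 := PySem.Int.mod_nonneg number (by norm_num)
    have h1 : PySem.Int.mod number 10 < 10 := PySem.Int.mod_lt number (by norm_num)
    have h2 : PySem.Int.mod (PySem.Int.mod number 10) 100 = PySem.Int.mod number 10 := by
      rw [PySem.Int.mod_eq_emod_of_pos (by norm_num)]
      exact Int.emod_eq_of_lt h0 (by omega)
    rw [h2, if_neg (by omega), if_pos h]
    omega
  · rename_i h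
    rw [PySem.Int.floordiv_eq_ediv_of_pos (by norm_num)]
    split_ifs <;> omega

-- ===== PORT B =====
-- Source B's local `m = n % 100` is inlined
def pvTail (n : Int) : String :=
  if PySem.Int.mod n 100 ≥ 20 then
    (PySem.List.pyGet? pvTENS (PySem.Int.floordiv (PySem.Int.mod n 100) 10 - 1)).getD ""
      ++ " " ++ (PySem.List.pyGet? pvUNITS (PySem.Int.mod n 10 - 1)).getD ""
  else
    (PySem.List.pyGet? pvUNITS (PySem.Int.mod n 100 - 1)).getD ""

-- the `while` loop of Source B: one tail per base-100 digit, in append order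
def pvGroups (n : Int) : List String :=
  if n < 100 then [pvTail n]
  else pvTail n :: pvGroups (PySem.Int.floordiv n 100)
termination_by n.toNat
decreasing_by
  rename_i h
  rw [PySem.Int.floordiv_eq_ediv_of_pos (by norm_num)]
  omega

def number_as_string_grouped_alt (number : Int) : String :=
  PySem.Str.join " hundred " (pvGroups number).reverse

-- ===== PRECONDITION & SPEC =====
def Spec_number_as_string_grouped (number : Int) (out : String) : Prop := out = number_as_string_grouped_alt number
instance (number : Int) (out : String) : Decidable (Spec_number_as_string_grouped number out) := by unfold Spec_number_as_string_grouped; infer_instance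

-- ===== CLAIM (what is proved, stated in full; the proofs are below) =====
def Claim_equal_number_as_string_grouped : Prop := ∀ (number : Int), Dom_number_as_string_grouped number → Spec_number_as_string_grouped number (number_as_string_grouped number)

-- ===== LEMMAS AND PROOFS =====

theorem strJoin_singleton (sep a : String) : PySem.Str.join sep [a] = a := by
  unfold PySem.Str.join
  simp [PySem.Chars.join_singleton, String.ofList_toList]

theorem charsJoin_append_singleton (sep y : List Char) (xs : List (List Char)) (h : xs ≠ []) :
    PySem.Chars.join sep (xs ++ [y]) = PySem.Chars.join sep xs ++ sep ++ y := by
  induction xs with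
  | nil => exact absurd rfl h
  | cons hd tl ih =>
    cases tl with
    | nil =>
      show PySem.Chars.join sep [hd, y] = _
      rw [PySem.Chars.join_cons_cons, PySem.Chars.join_singleton, PySem.Chars.join_singleton]
    | cons t ts =>
      simp only [List.cons_append] at ih ⊢
      rw [PySem.Chars.join_cons_cons, ih (by simp), PySem.Chars.join_cons_cons]
      simp [List.append_assoc]

theorem strJoin_append_singleton (sep y : String) (xs : List String) (h : xs ≠ []) :
    PySem.Str.join sep (xs ++ [y]) = PySem.Str.join sep xs ++ sep ++ y := by
  unfold PySem.Str.join
  rw [List.map_append, List.map_singleton,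
    charsJoin_append_singleton _ _ _ (by simpa using h),
    String.ofList_append, String.ofList_append, String.ofList_toList, String.ofList_toList]

theorem strJoin_pair (a b : String) : PySem.Str.join " " [a, b] = a ++ " " ++ b := by
  have : ([a] : List String) ++ [b] = [a, b] := rfl
  rw [← this, strJoin_append_singleton _ _ _ (by simp), strJoin_singleton]

theorem pvGroups_ne_nil (n : Int) : pvGroups n ≠ [] := by
  rw [pvGroups]; split <;> simp

-- A on a one-digit argument (the inner recursive call) is a plain UNITS lookup
theorem A_small (a : Int) (h0 : 0 ≤ a) (h1 : a < 20) :
    number_as_string_grouped a = (PySem.List.pyGet? pvUNITS (a - 1)).getD "" := by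
  rw [number_as_string_grouped]
  have hm : PySem.Int.mod a 100 = a := by
    rw [PySem.Int.mod_eq_emod_of_pos (by norm_num)]
    exact Int.emod_eq_of_lt h0 (by omega)
  simp only [hm]
  rw [if_neg (by omega), if_neg (by omega), strJoin_singleton]

theorem hundred_glue (x t : String) :
    (x ++ " hundred") ++ " " ++ t = x ++ " hundred " ++ t := by
  have h : (x ++ " hundred") ++ " " = x ++ " hundred " := by
    rw [String.append_assoc]
    exact congrArg (fun s => x ++ s) (by decide : (" hundred" : String) ++ " " = " hundred ")
  exact congrArg (fun s => s ++ t) h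

theorem main_eq (n : Int) :
    number_as_string_grouped n = PySem.Str.join " hundred " (pvGroups n).reverse := by
  rw [number_as_string_grouped, pvGroups]
  have htail :
      (if PySem.Int.mod n 100 ≥ 20 then
        [(PySem.List.pyGet? pvTENS (PySem.Int.floordiv (PySem.Int.mod n 100) 10 - 1)).getD ""
          ++ " " ++ number_as_string_grouped (PySem.Int.mod n 10)]
      else [(PySem.List.pyGet? pvUNITS (PySem.Int.mod n 100 - 1)).getD ""]) = [pvTail n] := by
    unfold pvTail
    split
    · rename_i h
      rw [A_small (PySem.Int.mod n 10)
        (PySem.Int.mod_nonneg n (by norm_num))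
        (by have := PySem.Int.mod_lt n (b := 10) (by norm_num); omega)]
    · rfl
  rw [htail]
  by_cases hge : n ≥ 100
  · rw [if_pos hge, if_neg (by omega), List.reverse_cons,
      strJoin_append_singleton _ _ _ (by simp [pvGroups_ne_nil]),
      strJoin_pair, main_eq (PySem.Int.floordiv n 100), hundred_glue]
  · rw [if_neg hge, if_pos (by omega), List.reverse_singleton, strJoin_singleton, strJoin_singleton]
termination_by n.toNat
decreasing_by
  rw [PySem.Int.floordiv_eq_ediv_of_pos (by norm_num)]
  omega

-- ===== VERDICT (by name: the statement is the Claim_ definition above) =====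
theorem number_as_string_grouped_spec : Claim_equal_number_as_string_grouped := by
  intro number _
  exact main_eq number
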